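-- pv_equiv track=rewrite | github.com/mohankalimuthu/My_Learnings | DSAsolving/daily_problems/14-01-2025/sandwhich vowels.py | sandwhich
-- ===== SOURCE A (Python) =====
-- def sandwhich(s):
--     res = ''
--     vowel = ['a','e','i','o','u']
--     for i in range(len(s)):
--         if i!=0 and i!=len(s)-1:
--             if s[i-1] not in vowel and s[i] in vowel and s[i+1] not in vowel:
--                 continue
--             else:
--                 res+=s[i]
--         else:
--             res+=s[i]
--     return res
-- ===== SOURCE B (Python) =====
-- def sandwhich(s):
--     vowels = 'aeiou'
--     # Stage 1: run-length grouping by vowel-ness (maximal runs of vowels / non-vowels).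
--     groups = []
--     cur = ''
--     for ch in s:
--         if cur and (cur[0] in vowels) == (ch in vowels):
--             cur += ch
--         else:
--             if cur:
--                 groups.append(cur)
--             cur = ch
--     if cur:
--         groups.append(cur)
--     # Stage 2: drop singleton vowel runs that are strictly interior; join the rest.
--     n = len(groups)
--     return ''.join(g for j, g in enumerate(groups)
--                    if j == 0 or j == n - 1 or not (len(g) == 1 and g[0] in vowels))
-- ===== Notes on version B (the rewrite author's own statement) =====
-- stated objective: alternative
-- what changed: Instead of an indexed pass testing each character's two neighbours with list-membership checks, B run-length-groups the string into maximal vowel/non-vowel runs, drops exactly the singleton vowel runs that are strictly interior in the run list, and joins the surviving runs.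
import Mathlib
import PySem

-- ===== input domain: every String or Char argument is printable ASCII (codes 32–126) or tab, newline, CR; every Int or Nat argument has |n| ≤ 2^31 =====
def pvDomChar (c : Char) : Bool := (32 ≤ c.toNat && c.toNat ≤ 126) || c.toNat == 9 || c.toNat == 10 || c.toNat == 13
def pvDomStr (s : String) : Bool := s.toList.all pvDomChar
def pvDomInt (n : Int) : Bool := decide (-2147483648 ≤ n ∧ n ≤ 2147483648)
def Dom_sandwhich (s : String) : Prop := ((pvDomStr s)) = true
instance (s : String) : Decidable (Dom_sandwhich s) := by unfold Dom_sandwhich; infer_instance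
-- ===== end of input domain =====

-- B replaces the indexed neighbour-testing pass by run-length grouping into maximal
-- vowel/non-vowel runs, dropping the strictly interior singleton vowel runs; same O(n) cost.
-- ===== PORT A =====
def isVowelA (c : Char) : Bool := ['a','e','i','o','u'].contains c

def sandwhich (s : String) : String :=
  let l := s.toList
  let n : Int := PySem.List.len l
  let res := (PySem.List.pyRange 0 n 1).foldl (fun res i =>
    if i ≠ 0 ∧ i ≠ n - 1 then
      if ¬ isVowelA (PySem.List.pyGetD l (i - 1) ' ') = true ∧
          isVowelA (PySem.List.pyGetD l i ' ') = true ∧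
          ¬ isVowelA (PySem.List.pyGetD l (i + 1) ' ') = true then
        res
      else
        res ++ [PySem.List.pyGetD l i ' ']
    else
      res ++ [PySem.List.pyGetD l i ' ']) []
  String.ofList res

-- ===== PORT B =====
def isVowelB (c : Char) : Bool := "aeiou".toList.contains c

-- the body of B's grouping loop: extend the current run or flush it and start a new one
def stepB (st : List (List Char) × List Char) (ch : Char) : List (List Char) × List Char :=
  if st.2 ≠ [] ∧ isVowelB (st.2.headD ' ') = isVowelB ch then
    (st.1, st.2 ++ [ch])
  else
    ((if st.2 ≠ [] then st.1 ++ [st.2] else st.1), [ch])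

def sandwhich_alt (s : String) : String :=
  let fin := s.toList.foldl stepB ([], [])
  let groups := if fin.2 ≠ [] then fin.1 ++ [fin.2] else fin.1
  let n : Int := PySem.List.len groups
  String.ofList
    ((((PySem.List.enumerate groups).filter
        (fun jg => jg.1 == 0 || jg.1 == n - 1 ||
          !(jg.2.length == 1 && isVowelB (jg.2.headD ' ')))).map Prod.snd).flatten)

-- ===== PRECONDITION & SPEC =====
def Spec_sandwhich (s : String) (out : String) : Prop := out = sandwhich_alt s
instance (s : String) (out : String) : Decidable (Spec_sandwhich s out) := by unfold Spec_sandwhich; infer_instance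

-- ===== CLAIM (what is proved, stated in full; the proofs are below) =====
def Claim_equal_sandwhich : Prop := ∀ (s : String), Dom_sandwhich s → Spec_sandwhich s (sandwhich s)

-- ===== LEMMAS AND PROOFS =====

-- common spec: the characters A keeps after the first one, given the previous character
def bodySpec (prev : Char) : List Char → List Char
  | [] => []
  | [b] => [b]
  | b :: c :: rest =>
      (if ¬ isVowelA prev = true ∧ isVowelA b = true ∧ ¬ isVowelA c = true then []
       else [b]) ++ bodySpec b (c :: rest)

def Fa (l : List Char) (res : List Char) (i : Int) : List Char :=
  if i ≠ 0 ∧ i ≠ (PySem.List.len l) - 1 then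
    if ¬ isVowelA (PySem.List.pyGetD l (i - 1) ' ') = true ∧
        isVowelA (PySem.List.pyGetD l i ' ') = true ∧
        ¬ isVowelA (PySem.List.pyGetD l (i + 1) ' ') = true then
      res
    else
      res ++ [PySem.List.pyGetD l i ' ']
  else
    res ++ [PySem.List.pyGetD l i ' ']

lemma A_fold (l : List Char) (k : Nat) (hk1 : 1 ≤ k) (hk2 : k ≤ l.length)
    (acc : List Char) :
    (PySem.List.pyRange (k : Int) (l.length : Int) 1).foldl (Fa l) acc =
      acc ++ bodySpec (l.getD (k - 1) ' ') (l.drop k) := by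
  have H : ∀ m k acc, 1 ≤ k → k ≤ l.length → l.length - k = m →
      (PySem.List.pyRange (k : Int) (l.length : Int) 1).foldl (Fa l) acc =
        acc ++ bodySpec (l.getD (k - 1) ' ') (l.drop k) := by
    intro m
    induction m with
    | zero =>
      intro k acc hk1 hk2 hm
      have hk : k = l.length := by omega
      subst hk
      rw [PySem.List.pyRange_one_eq_nil (le_refl _)]
      simp [bodySpec, List.drop_length]
    | succ m ih =>
      intro k acc hk1 hk2 hm
      have hkl : k < l.length := by omega
      rw [PySem.List.pyRange_one_cons (by exact_mod_cast hkl)]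
      simp only [List.foldl_cons]
      have e1 : ((k : Int) + 1) = ((k + 1 : Nat) : Int) := by push_cast; ring
      rw [e1, ih (k + 1) (Fa l acc k) (by omega) (by omega) (by omega)]
      have hFa : Fa l acc (k : Int) =
          if ¬ isVowelA (l.getD (k - 1) ' ') = true ∧ isVowelA (l.getD k ' ') = true ∧
              ¬ isVowelA (l.getD (k + 1) ' ') = true ∧ k < l.length - 1 then acc
          else acc ++ [l.getD k ' '] := by
        have e2 : ((k : Int) - 1) = ((k - 1 : Nat) : Int) := by omega
        simp only [Fa, PySem.List.len_eq, e2, e1, PySem.List.pyGetD_natCast]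
        by_cases hlast : k = l.length - 1
        · have : ¬ ((k : Int) ≠ 0 ∧ (k : Int) ≠ (l.length : Int) - 1) := by omega
          rw [if_neg this]
          have : ¬ (¬ isVowelA (l.getD (k - 1) ' ') = true ∧ isVowelA (l.getD k ' ') = true ∧
              ¬ isVowelA (l.getD (k + 1) ' ') = true ∧ k < l.length - 1) := by omega
          rw [if_neg this]
        · have : ((k : Int) ≠ 0 ∧ (k : Int) ≠ (l.length : Int) - 1) := by omega
          rw [if_pos this]
          have hk2' : k < l.length - 1 := by omega
          by_cases hc : ¬ isVowelA (l.getD (k - 1) ' ') = true ∧ isVowelA (l.getD k ' ') = true ∧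
              ¬ isVowelA (l.getD (k + 1) ' ') = true
          · rw [if_pos hc, if_pos ⟨hc.1, hc.2.1, hc.2.2, hk2'⟩]
          · rw [if_neg hc, if_neg (by tauto)]
      rw [hFa]
      have hdropk : l.drop k = l.getD k ' ' :: l.drop (k + 1) := by
        rw [List.drop_eq_getElem_cons hkl, List.getD_eq_getElem l ' ' hkl]
      by_cases hlast : k = l.length - 1
      · have hdrop1 : l.drop (k + 1) = [] := List.drop_eq_nil_of_le (by omega)
        have : ¬ (¬ isVowelA (l.getD (k - 1) ' ') = true ∧ isVowelA (l.getD k ' ') = true ∧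
            ¬ isVowelA (l.getD (k + 1) ' ') = true ∧ k < l.length - 1) := by omega
        rw [if_neg this, hdropk, hdrop1]
        simp [bodySpec]
      · have hkl1 : k + 1 < l.length := by omega
        have hdrop1 : l.drop (k + 1) = l.getD (k + 1) ' ' :: l.drop (k + 2) := by
          rw [List.drop_eq_getElem_cons hkl1, List.getD_eq_getElem l ' ' hkl1]
        have hk2' : k < l.length - 1 := by omega
        rw [hdropk, hdrop1]
        simp only [bodySpec]
        have hsimp : k + 1 - 1 = k := by omega
        rw [hsimp]
        by_cases hc : ¬ isVowelA (l.getD (k - 1) ' ') = true ∧ isVowelA (l.getD k ' ') = true ∧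
            ¬ isVowelA (l.getD (k + 1) ' ') = true
        · rw [if_pos ⟨hc.1, hc.2.1, hc.2.2, hk2'⟩, if_pos hc]
          simp
        · rw [if_neg (by tauto), if_neg hc]
          simp
  exact H (l.length - k) k acc hk1 hk2 rfl

lemma A_eq (s : String) :
    sandwhich s = String.ofList
      (match s.toList with
       | [] => []
       | a :: rest => a :: bodySpec a rest) := by
  have hA : sandwhich s =
      String.ofList ((PySem.List.pyRange 0 (PySem.List.len s.toList) 1).foldl (Fa s.toList) []) := rfl
  rw [hA]
  match hl : s.toList with
  | [] => simp [PySem.List.pyRange]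
  | a :: rest =>
    have hpos : (0 : Int) < ((a :: rest).length : Int) := by simp
    rw [PySem.List.len_eq, PySem.List.pyRange_one_cons hpos]
    simp only [List.foldl_cons]
    have hFa0 : Fa (a :: rest) [] 0 = [a] := by simp [Fa]
    have e1 : ((0 : Int) + 1) = ((1 : Nat) : Int) := by norm_num
    rw [hFa0, e1, A_fold (a :: rest) 1 (by omega) (by simp) [a]]
    simp

lemma vB (c : Char) : isVowelB c = isVowelA c := by
  simp [isVowelA, isVowelB]

-- the maximal runs of constant vowel-ness, starting from a (nonempty) current run
def runsFrom : List Char → List Char → List (List Char)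
  | cur, [] => [cur]
  | cur, c :: t =>
      if isVowelA (cur.headD ' ') = isVowelA c then runsFrom (cur ++ [c]) t
      else cur :: runsFrom [c] t

-- selection among the groups after the first: last kept, interior singleton vowel runs dropped
def fB : List (List Char) → List Char
  | [] => []
  | [g] => g
  | g :: g' :: t =>
      (if g.length = 1 ∧ isVowelA (g.headD ' ') = true then [] else g) ++ fB (g' :: t)

def joinSel : List (List Char) → List Char
  | [] => []
  | g :: t => g ++ fB t

def closeB (st : List (List Char) × List Char) : List (List Char) :=
  if st.2 ≠ [] then st.1 ++ [st.2] else st.1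

lemma fold_runs (l : List Char) : ∀ (gs : List (List Char)) (cur : List Char), cur ≠ [] →
    closeB (l.foldl stepB (gs, cur)) = gs ++ runsFrom cur l := by
  induction l with
  | nil =>
    intro gs cur hc
    simp [closeB, hc, runsFrom]
  | cons c t ih =>
    intro gs cur hc
    simp only [List.foldl_cons]
    by_cases hsame : isVowelA (cur.headD ' ') = isVowelA c
    · have hstep : stepB (gs, cur) c = (gs, cur ++ [c]) := by
        have hsame' : isVowelA (cur.head?.getD ' ') = isVowelA c := by
          rw [← List.headD_eq_head?_getD]; exact hsame
        simp [stepB, hc, vB, hsame']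
      rw [hstep, ih gs (cur ++ [c]) (by simp), runsFrom, if_pos hsame]
    · have hstep : stepB (gs, cur) c = (gs ++ [cur], [c]) := by
        have hsame' : ¬ isVowelB (cur.head?.getD ' ') = isVowelB c := by
          rw [← List.headD_eq_head?_getD, vB, vB]; exact hsame
        simp [stepB, hc, hsame']
      rw [hstep, ih (gs ++ [cur]) [c] (by simp), runsFrom, if_neg hsame]
      simp

lemma headD_append (cur : List Char) (c d : Char) (h : cur ≠ []) :
    (cur ++ [c]).headD d = cur.headD d := by
  cases cur with
  | nil => simp at h
  | cons x t => simp

lemma runsFrom_ne_nil (l : List Char) : ∀ (cur : List Char), runsFrom cur l ≠ [] := by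
  induction l with
  | nil => intro cur; simp [runsFrom]
  | cons c t ih =>
    intro cur
    rw [runsFrom]
    split
    · exact ih _
    · simp

lemma fB_cons (g : List Char) (gs : List (List Char)) (h : gs ≠ []) :
    fB (g :: gs) =
      (if g.length = 1 ∧ isVowelA (g.headD ' ') = true then [] else g) ++ fB gs := by
  cases gs with
  | nil => simp at h
  | cons g' t => rfl

lemma f_runs (l : List Char) : ∀ (cur : List Char), cur ≠ [] →
    isVowelA (cur.getLastD ' ') = isVowelA (cur.headD ' ') →
    fB (runsFrom cur l) =
      (if cur.length = 1 ∧ isVowelA (cur.headD ' ') = true ∧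
          ¬ isVowelA (l.headD ' ') = true ∧ l ≠ [] then [] else cur) ++
        bodySpec (cur.getLastD ' ') l := by
  induction l with
  | nil =>
    intro cur hc hlast
    simp [runsFrom, fB, bodySpec]
  | cons c t ih =>
    intro cur hc hlast
    by_cases hsame : isVowelA (cur.headD ' ') = isVowelA c
    · rw [runsFrom, if_pos hsame,
        ih (cur ++ [c]) (by simp) (by
          have hgl : (cur ++ [c]).getLastD ' ' = c := by simp
          rw [hgl, headD_append cur c ' ' hc, hsame])]
      have hlen : ¬ ((cur ++ [c]).length = 1 ∧
          isVowelA ((cur ++ [c]).headD ' ') = true ∧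
          ¬ isVowelA (t.headD ' ') = true ∧ t ≠ []) := by
        intro h
        have := h.1
        cases cur with
        | nil => exact hc rfl
        | cons x u => simp at this
      rw [if_neg hlen]
      have hKcur : ¬ (cur.length = 1 ∧ isVowelA (cur.headD ' ') = true ∧
          ¬ isVowelA ((c :: t).headD ' ') = true ∧ (c :: t) ≠ []) := by
        intro h
        have : isVowelA c = true := hsame ▸ h.2.1
        exact h.2.2.1 (by simpa using this)
      rw [if_neg hKcur]
      have hlastc : (cur ++ [c]).getLastD ' ' = c := by simp
      rw [hlastc]
      have hbody : bodySpec (cur.getLastD ' ') (c :: t) = [c] ++ bodySpec c t := by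
        cases t with
        | nil => simp [bodySpec]
        | cons d t' =>
          have hne : ¬ (¬ isVowelA (cur.getLastD ' ') = true ∧ isVowelA c = true ∧
              ¬ isVowelA d = true) := by
            intro h
            exact h.1 (by rw [hlast, hsame]; exact h.2.1)
          simp only [bodySpec]
          rw [if_neg hne]
      rw [hbody]
      simp
    · rw [runsFrom, if_neg hsame]
      rw [fB_cons cur _ (runsFrom_ne_nil t [c]), ih [c] (by simp) (by simp)]
      have hKcur : (cur.length = 1 ∧ isVowelA (cur.headD ' ') = true ∧
          ¬ isVowelA ((c :: t).headD ' ') = true ∧ (c :: t) ≠ []) ↔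
          (cur.length = 1 ∧ isVowelA (cur.headD ' ') = true) := by
        constructor
        · rintro ⟨h1, h2, _, _⟩; exact ⟨h1, h2⟩
        · rintro ⟨h1, h2⟩
          refine ⟨h1, h2, ?_, by simp⟩
          simp only [List.headD_cons]
          intro hcv
          exact hsame (h2.trans hcv.symm)
      have hbody : (if [c].length = 1 ∧ isVowelA ([c].headD ' ') = true ∧
            ¬ isVowelA (t.headD ' ') = true ∧ t ≠ [] then ([] : List Char) else [c]) ++
          bodySpec ([c].getLastD ' ') t = bodySpec (cur.getLastD ' ') (c :: t) := by
        cases t with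
        | nil => simp [bodySpec]
        | cons d t' =>
          simp only [List.length_cons, List.length_nil, List.headD_cons, List.getLastD_cons,
            List.getLastD_nil, ne_eq, reduceCtorEq, not_false_iff, and_true, true_and]
          have hcases : (isVowelA c = true ∧ ¬ isVowelA d = true) ↔
              (¬ isVowelA (cur.getLastD ' ') = true ∧ isVowelA c = true ∧
                ¬ isVowelA d = true) := by
            constructor
            · rintro ⟨h1, h2⟩
              refine ⟨?_, h1, h2⟩
              rw [hlast]
              intro hv
              exact hsame (hv.trans h1.symm)
            · rintro ⟨_, h1, h2⟩; exact ⟨h1, h2⟩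
          simp only [bodySpec]
          by_cases hcd : isVowelA c = true ∧ ¬ isVowelA d = true
          · rw [if_pos hcd, if_pos (hcases.mp hcd)]
          · rw [if_neg hcd, if_neg (fun h => hcd (hcases.mpr h))]
      rw [hbody]
      by_cases hK : cur.length = 1 ∧ isVowelA (cur.headD ' ') = true
      · rw [if_pos (hKcur.mpr hK), if_pos hK]
      · rw [if_neg (fun h => hK (hKcur.mp h)), if_neg hK]

lemma join_runs (l : List Char) : ∀ (cur : List Char), cur ≠ [] →
    isVowelA (cur.getLastD ' ') = isVowelA (cur.headD ' ') →
    joinSel (runsFrom cur l) = cur ++ bodySpec (cur.getLastD ' ') l := by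
  induction l with
  | nil =>
    intro cur hc hlast
    simp [runsFrom, joinSel, fB, bodySpec]
  | cons c t ih =>
    intro cur hc hlast
    by_cases hsame : isVowelA (cur.headD ' ') = isVowelA c
    · rw [runsFrom, if_pos hsame,
        ih (cur ++ [c]) (by simp) (by
          have hgl : (cur ++ [c]).getLastD ' ' = c := by simp
          rw [hgl, headD_append cur c ' ' hc, hsame])]
      have hlastc : (cur ++ [c]).getLastD ' ' = c := by simp
      rw [hlastc]
      have hbody : bodySpec (cur.getLastD ' ') (c :: t) = [c] ++ bodySpec c t := by
        cases t with
        | nil => simp [bodySpec]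
        | cons d t' =>
          have hne : ¬ (¬ isVowelA (cur.getLastD ' ') = true ∧ isVowelA c = true ∧
              ¬ isVowelA d = true) := by
            intro h
            exact h.1 (by rw [hlast, hsame]; exact h.2.1)
          simp only [bodySpec]
          rw [if_neg hne]
      rw [hbody]
      simp
    · rw [runsFrom, if_neg hsame, joinSel,
        f_runs t [c] (by simp) (by simp)]
      have hbody : (if [c].length = 1 ∧ isVowelA ([c].headD ' ') = true ∧
            ¬ isVowelA (t.headD ' ') = true ∧ t ≠ [] then ([] : List Char) else [c]) ++
          bodySpec ([c].getLastD ' ') t = bodySpec (cur.getLastD ' ') (c :: t) := by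
        cases t with
        | nil => simp [bodySpec]
        | cons d t' =>
          simp only [List.length_cons, List.length_nil, List.headD_cons, List.getLastD_cons,
            List.getLastD_nil, ne_eq, reduceCtorEq, not_false_iff, and_true, true_and]
          have hcases : (isVowelA c = true ∧ ¬ isVowelA d = true) ↔
              (¬ isVowelA (cur.getLastD ' ') = true ∧ isVowelA c = true ∧
                ¬ isVowelA d = true) := by
            constructor
            · rintro ⟨h1, h2⟩
              refine ⟨?_, h1, h2⟩
              rw [hlast]
              intro hv
              exact hsame (hv.trans h1.symm)
            · rintro ⟨_, h1, h2⟩; exact ⟨h1, h2⟩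
          simp only [bodySpec]
          by_cases hcd : isVowelA c = true ∧ ¬ isVowelA d = true
          · rw [if_pos hcd, if_pos (hcases.mp hcd)]
          · rw [if_neg hcd, if_neg (fun h => hcd (hcases.mpr h))]
      rw [hbody]

def selPred (n : Int) (jg : Int × List Char) : Bool :=
  jg.1 == 0 || jg.1 == n - 1 || !(jg.2.length == 1 && isVowelB (jg.2.headD ' '))

lemma enum_f (gs : List (List Char)) : ∀ (k : Nat) (n : Int), 1 ≤ k →
    n = (k : Int) + gs.length →
    ((((PySem.List.enumerate gs (k : Int)).filter (selPred n)).map Prod.snd).flatten) = fB gs := by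
  induction gs with
  | nil => intro k n _ _; simp [PySem.List.enumerate_nil, fB]
  | cons g t ih =>
    intro k n hk hn
    rw [PySem.List.enumerate_cons]
    cases t with
    | nil =>
      have hsel : selPred n ((k : Int), g) = true := by
        have : ((k : Int) == n - 1) = true := by
          rw [beq_iff_eq, hn]; simp only [List.length_cons, List.length_nil]; push_cast; omega
        simp [selPred, this]
      simp [List.filter_cons, hsel, PySem.List.enumerate_nil, fB]
    | cons g' t' =>
      have h0 : ((k : Int) == 0) = false := by simp; omega
      have h1 : ((k : Int) == n - 1) = false := by
        simp only [hn]; simp; omega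
      have hsel : selPred n ((k : Int), g) =
          !(g.length == 1 && isVowelB (g.headD ' ')) := by
        simp [selPred, h0, h1]
      have hrec : (((PySem.List.enumerate (g' :: t') ((k : Int) + 1)).filter
            (selPred n)).map Prod.snd).flatten = fB (g' :: t') := by
        have e1 : ((k : Int) + 1) = ((k + 1 : Nat) : Int) := by push_cast; ring
        rw [e1]
        exact ih (k + 1) n (by omega) (by simp at hn ⊢; omega)
      by_cases hg : g.length = 1 ∧ isVowelA (g.headD ' ') = true
      · have hbool : (g.length == 1 && isVowelB (g.headD ' ')) = true := by
          have h2 := hg.2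
          simp only [vB, hg.1, beq_self_eq_true, Bool.true_and]
          exact h2
        rw [List.filter_cons, hsel, hbool, Bool.not_true, if_neg (by simp)]
        rw [hrec, fB_cons g (g' :: t') (by simp), if_pos hg, List.nil_append]
      · have hbool : (g.length == 1 && isVowelB (g.headD ' ')) = false := by
          by_cases hl : g.length = 1
          · have h2 : isVowelA (g.headD ' ') = false := by
              cases hb : isVowelA (g.headD ' ')
              · rfl
              · exact absurd ⟨hl, hb⟩ hg
            have h2' : isVowelA (g.head?.getD ' ') = false := by
              rw [← List.headD_eq_head?_getD]; exact h2
            simp [vB, hl, h2']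
          · simp [hl]
        rw [List.filter_cons, hsel, hbool, Bool.not_false, if_pos rfl,
          List.map_cons, List.flatten_cons, hrec,
          fB_cons g (g' :: t') (by simp), if_neg hg]

lemma enum_join (gs : List (List Char)) :
    ((((PySem.List.enumerate gs 0).filter (selPred gs.length)).map Prod.snd).flatten) =
      joinSel gs := by
  cases gs with
  | nil => simp [PySem.List.enumerate_nil, joinSel]
  | cons g t =>
    rw [PySem.List.enumerate_cons]
    have hsel : selPred ((g :: t).length : Int) ((0 : Int), g) = true := by
      simp [selPred]
    simp only [List.filter_cons, hsel, if_true, List.map_cons, List.flatten_cons]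
    have e1 : ((0 : Int) + 1) = ((1 : Nat) : Int) := by norm_num
    rw [e1, enum_f t 1 ((g :: t).length : Int) (by omega) (by simp only [List.length_cons]; push_cast; omega)]
    rfl

lemma B_eq (s : String) :
    sandwhich_alt s = String.ofList
      (match s.toList with
       | [] => []
       | a :: rest => a :: bodySpec a rest) := by
  have hB : sandwhich_alt s = String.ofList
      ((((PySem.List.enumerate (closeB (s.toList.foldl stepB ([], [])))
          (0 : Int)).filter
            (selPred (PySem.List.len (closeB (s.toList.foldl stepB ([], [])))))).map
        Prod.snd).flatten) := rfl
  rw [hB]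
  match hl : s.toList with
  | [] =>
    simp [closeB, PySem.List.enumerate_nil]
  | a :: rest =>
    have hstep : stepB ([], []) a = ([], [a]) := by simp [stepB]
    have hfold : closeB ((a :: rest).foldl stepB ([], [])) = runsFrom [a] rest := by
      simp only [List.foldl_cons, hstep]
      have := fold_runs rest [] [a] (by simp)
      simpa using this
    rw [hfold, PySem.List.len_eq, enum_join (runsFrom [a] rest),
      join_runs rest [a] (by simp) (by simp)]
    simp [bodySpec]

-- ===== VERDICT (by name: the statement is the Claim_ definition above) =====
theorem sandwhich_spec : Claim_equal_sandwhich := by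
  intro s _
  unfold Spec_sandwhich
  rw [A_eq, B_eq]
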